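-- pv_equiv track=rewrite | github.com/FAdy-200/problem_solving | misc/ATL/exam/Q1.py | solution
-- ===== SOURCE A (Python) =====
-- def subcheck(s, ind):
--     n = len(s)
--
--     if n % ind:
--         return False
--     chunks = n // ind
--     for i in range(chunks):
--         m1 = s[i * ind:(ind * (i + 1))]
--         m2 = s[n - (i + 1) * ind:n - i * ind]
--         if m1 != m2:
--             return False
--     return True
--
-- def solution(S):
--     m = S[0]
--     ans = 0
--     for j in S[::-1]:
--         ans += 1
--         if j == m:
--             goalcheck = subcheck(S, ans)
--             if goalcheck:
--                 if ans == len(S):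
--                     return -1
--                 return ans
--
--     return -1
-- ===== SOURCE B (Python) =====
-- def solution(S):
--     n = len(S)
--     R = S[::-1]
--     # collect divisors of n in sqrt-time: small ones ascending, their cofactors descending
--     small = []
--     large = []
--     i = 1
--     while i * i <= n:
--         if n % i == 0:
--             small.append(i)
--             if i != n // i:
--                 large.append(n // i)
--         i += 1
--     # ascending divisors = small + reversed(large); a block length d works iff
--     # reversing the whole string equals reversing each block in place
--     for d in small + large[::-1]:
--         if d < n and R == ''.join(S[k * d:k * d + d][::-1] for k in range(n // d)):
--             return d
--     return -1
-- ===== Notes on version B (the rewrite author's own statement) =====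
-- stated objective: alternative
-- what changed: B generates the candidate block lengths as the divisors of n in cofactor pairs up to sqrt(n) (small divisors ascending plus their reversed cofactors) instead of A's walk over the reversed string, and tests each length by comparing the reversed whole string with the concatenation of the individually reversed blocks instead of A's pairwise early-exit chunk comparison.
import Mathlib
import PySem

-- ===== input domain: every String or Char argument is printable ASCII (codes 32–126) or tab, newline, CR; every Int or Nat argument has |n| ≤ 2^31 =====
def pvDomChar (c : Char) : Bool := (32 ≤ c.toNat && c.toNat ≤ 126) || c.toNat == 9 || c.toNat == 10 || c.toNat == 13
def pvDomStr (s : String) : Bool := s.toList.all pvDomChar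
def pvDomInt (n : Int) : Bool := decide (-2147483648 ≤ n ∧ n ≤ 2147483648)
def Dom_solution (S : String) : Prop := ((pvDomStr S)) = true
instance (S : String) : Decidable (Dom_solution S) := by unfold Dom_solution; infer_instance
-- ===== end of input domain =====

-- B finds candidate block lengths by generating the divisors of n in cofactor pairs up to √n and
-- tests each length d by comparing the reversed whole string with the concatenation of the
-- individually reversed blocks, instead of A's reversed-string walk with a pairwise chunk subcheck
-- (objective: alternative).

-- ===== PORT A =====
-- the for-loop of subcheck, early-exiting on a mismatching chunk pair
def subcheckLoop (s : List Char) (n ind : Int) : List Int → Bool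
  | [] => true
  | i :: rest =>
      let m1 := PySem.List.slice s (some (i * ind)) (some (ind * (i + 1)))
      let m2 := PySem.List.slice s (some (n - (i + 1) * ind)) (some (n - i * ind))
      if m1 ≠ m2 then false else subcheckLoop s n ind rest

def subcheck (s : List Char) (ind : Int) : Bool :=
  let n : Int := (s.length : Int)
  if PySem.Int.mod n ind ≠ 0 then false
  else subcheckLoop s n ind (PySem.List.pyRange 0 (PySem.Int.floordiv n ind) 1)

-- the for-loop of solution over S[::-1], with the running counter ans
def solLoop (s : List Char) (m : Char) (n : Int) : List Char → Int → Int
  | [], _ => -1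
  | j :: rest, ans =>
      if j = m then
        if subcheck s (ans + 1) then
          if ans + 1 = n then -1 else ans + 1
        else solLoop s m n rest (ans + 1)
      else solLoop s m n rest (ans + 1)

def solution (S : String) : Int :=
  match PySem.Str.pyGet? S 0 with
  | none => -1   -- unreached inside Pre_solution: Python raises IndexError on the empty string
  | some m =>
      let s := S.toList
      solLoop s m (s.length : Int) ((PySem.List.slice? s none none (-1)).getD []) 0

-- ===== PORT B =====
-- the while-loop collecting divisor pairs: small ascending, cofactors in order of discovery
-- (structural recursion on the fuel (n+1-i).toNat, which exactly bounds the remaining iterations)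
def altDivsLoop : Nat → Int → Int → List Int → List Int → List Int × List Int
  | 0, _, _, small, large => (small, large)
  | t + 1, n, i, small, large =>
      if i * i ≤ n then
        if PySem.Int.mod n i = 0 then
          altDivsLoop t n (i + 1) (small ++ [i])
            (if i ≠ PySem.Int.floordiv n i then large ++ [PySem.Int.floordiv n i] else large)
        else altDivsLoop t n (i + 1) small large
      else (small, large)

def altDivs (n i : Int) (small large : List Int) : List Int × List Int :=
  altDivsLoop (n + 1 - i).toNat n i small large

-- ''.join(S[k*d:k*d+d][::-1] for k in range(n // d))
def joinRevBlocks (s : List Char) (n d : Int) : List Char :=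
  ((PySem.List.pyRange 0 (PySem.Int.floordiv n d) 1).map
    (fun k => (PySem.List.slice? (PySem.List.slice s (some (k * d)) (some (k * d + d)))
                 none none (-1)).getD [])).flatten

-- the for-loop over the ascending divisor list
def altLoop (s R : List Char) (n : Int) : List Int → Int
  | [] => -1
  | d :: rest =>
      if d < n ∧ R = joinRevBlocks s n d then d else altLoop s R n rest

def solution_alt (S : String) : Int :=
  let s := S.toList
  let n : Int := (s.length : Int)
  let R := (PySem.List.slice? s none none (-1)).getD []
  let p := altDivs n 1 [] []
  altLoop s R n (p.1 ++ (PySem.List.slice? p.2 none none (-1)).getD [])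

-- ===== PRECONDITION & SPEC =====
-- Pre_ excludes only the empty string, on which A raises IndexError at S[0].
def Pre_solution (S : String) : Prop := S.toList ≠ []
instance (S : String) : Decidable (Pre_solution S) := by unfold Pre_solution; infer_instance
def pvWitness_solution : String := "abab"


def Spec_solution (S : String) (out : Int) : Prop := out = solution_alt S
instance (S : String) (out : Int) : Decidable (Spec_solution S out) := by unfold Spec_solution; infer_instance

-- ===== CLAIM (what is proved, stated in full; the proofs are below) =====
def Claim_equal_solution : Prop := ∀ (S : String), Dom_solution S → Pre_solution S → Spec_solution S (solution S)

-- ===== LEMMAS AND PROOFS =====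

-- the i-th block of s for block width d
def blk (s : List Char) (d i : Nat) : List Char := (s.drop (i * d)).take d

-- the block list of s for width d, as a proof-side object
def blkList (s : List Char) (d : Nat) : List (List Char) :=
  (List.range (s.length / d)).map (blk s d)

-- proof-side reference loop: A's scan restated over the plain range 1..n-1
def rangeLoop (s : List Char) (n : Int) : List Int → Int
  | [] => -1
  | d :: rest =>
      if PySem.Int.mod n d = 0 then
        if blkList s d.toNat = (blkList s d.toNat).reverse then d else rangeLoop s n rest
      else rangeLoop s n rest

-- proof-side reference loop: first block-palindromic width in a list, else -1
def firstPal (s : List Char) : List Int → Int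
  | [] => -1
  | d :: rest =>
      if blkList s d.toNat = (blkList s d.toNat).reverse then d else firstPal s rest

-- one-step unfolding of the while loop, fuel-free
theorem altDivs_unfold (n i : Int) (small large : List Int) :
    altDivs n i small large =
      if i * i ≤ n then
        if PySem.Int.mod n i = 0 then
          altDivs n (i + 1) (small ++ [i])
            (if i ≠ PySem.Int.floordiv n i then large ++ [PySem.Int.floordiv n i] else large)
        else altDivs n (i + 1) small large
      else (small, large) := by
  unfold altDivs
  by_cases hg : i * i ≤ n
  · have hin : i ≤ n := by nlinarith [sq_nonneg (i - 1), mul_self_nonneg i]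
    have ht : (n + 1 - i).toNat = ((n + 1 - (i + 1)).toNat) + 1 := by omega
    rw [ht]
    simp only [altDivsLoop, if_pos hg]
  · have ht : ∃ t, (n + 1 - i).toNat = t := ⟨_, rfl⟩
    obtain ⟨t, hteq⟩ := ht
    rw [hteq]
    cases t with
    | zero => simp [altDivsLoop, if_neg hg]
    | succ t => simp only [altDivsLoop, if_neg hg]

theorem rangeLoop_eq_firstPal (s : List Char) (n : Int) (L : List Int) :
    rangeLoop s n L = firstPal s (L.filter (fun d => decide (PySem.Int.mod n d = 0))) := by
  induction L with
  | nil => rfl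
  | cons d rest ih =>
      by_cases hm : PySem.Int.mod n d = 0
      · simp only [rangeLoop, List.filter_cons, hm, decide_true, if_pos, firstPal]
        split_ifs <;> simp [ih]
      · simp only [rangeLoop, List.filter_cons, hm, decide_false, ih]
        simp

-- a mapped range reads the same backwards iff f i = f (c-1-i) for all i
theorem map_range_eq_reverse_iff {α : Type} (f : Nat → α) (c : Nat) :
    (List.range c).map f = ((List.range c).map f).reverse ↔ ∀ i < c, f i = f (c - 1 - i) := by
  set L := (List.range c).map f with hL
  have hget : ∀ (i : Nat), L[i]? = if i < c then some (f i) else none := by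
    intro i
    by_cases h : i < c
    · simp [hL, h]
    · rw [List.getElem?_eq_none (by simp [hL]; omega)]
      simp [h]
  constructor
  · intro h i hi
    have h2 : L[i]? = L.reverse[i]? := by rw [← h]
    rw [List.getElem?_reverse (by simp [hL]; omega), hget] at h2
    simp only [hL, List.length_map, List.length_range] at h2
    rw [hget] at h2
    simp [hi, show c - 1 - i < c by omega] at h2
    exact h2
  · intro h
    apply List.ext_getElem?
    intro i
    by_cases hi : i < c
    · rw [List.getElem?_reverse (by simp [hL]; omega), hget]
      simp only [hL, List.length_map, List.length_range]
      rw [hget]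
      simp [hi, show c - 1 - i < c by omega]
      exact h i hi
    · rw [List.getElem?_eq_none (by simp [hL]; omega), List.getElem?_eq_none (by simp [hL]; omega)]

theorem subcheckLoop_iff (s : List Char) (n ind : Int) (l : List Int) :
    subcheckLoop s n ind l = true ↔ ∀ i ∈ l,
      PySem.List.slice s (some (i * ind)) (some (ind * (i + 1)))
        = PySem.List.slice s (some (n - (i + 1) * ind)) (some (n - i * ind)) := by
  induction l with
  | nil => simp [subcheckLoop]
  | cons i rest ih =>
      simp only [subcheckLoop, List.mem_cons]
      split_ifs with h
      · simp only [false_iff]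
        intro hc
        exact h (hc i (Or.inl rfl))
      · rw [ne_eq, not_not] at h
        rw [ih]
        constructor
        · rintro hr j (rfl | hj)
          · exact h
          · exact hr j hj
        · intro hr j hj
          exact hr j (Or.inr hj)

-- A's forward chunk m1, over cast bounds, is the i-th block
theorem sliceA_eq_blk (s : List Char) (d i : Nat) :
    PySem.List.slice s (some ((i : Int) * (d : Int))) (some ((d : Int) * ((i : Int) + 1)))
      = blk s d i := by
  have h1 : (i : Int) * (d : Int) = ((i * d : Nat) : Int) := by push_cast; ring
  have h2 : (d : Int) * ((i : Int) + 1) = (((i + 1) * d : Nat) : Int) := by push_cast; ring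
  rw [h1, h2, PySem.List.slice_natCast]
  simp [blk, Nat.succ_mul]

-- B's chunk S[k*d:k*d+d], over cast bounds, is the k-th block
theorem sliceB_eq_blk (s : List Char) (d i : Nat) :
    PySem.List.slice s (some ((i : Int) * (d : Int))) (some ((i : Int) * (d : Int) + (d : Int)))
      = blk s d i := by
  have h2 : (i : Int) * (d : Int) + (d : Int) = (d : Int) * ((i : Int) + 1) := by ring
  rw [h2, sliceA_eq_blk]

-- A's backward chunk m2 is the (c-1-i)-th block when s splits into c blocks of width d
theorem sliceA2_eq_blk (s : List Char) (c d i : Nat) (hn : s.length = c * d) (hi : i < c) :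
    PySem.List.slice s (some ((s.length : Int) - ((i : Int) + 1) * (d : Int)))
        (some ((s.length : Int) - (i : Int) * (d : Int)))
      = blk s d (c - 1 - i) := by
  obtain ⟨j, hj⟩ : ∃ j, i + 1 + j = c := ⟨c - 1 - i, by omega⟩
  have hji : c - 1 - i = j := by omega
  have h1 : (s.length : Int) - ((i : Int) + 1) * (d : Int) = ((j * d : Nat) : Int) := by
    rw [hn]; push_cast; rw [← hj]; push_cast; ring
  have h2 : (s.length : Int) - (i : Int) * (d : Int) = (((j + 1) * d : Nat) : Int) := by
    rw [hn]; push_cast; rw [← hj]; push_cast; ring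
  rw [h1, h2, PySem.List.slice_natCast, hji]
  simp [blk, Nat.succ_mul]

-- characterisation of A's subcheck as divisibility + block-palindromicity, for Nat widths
theorem subcheck_iff (s : List Char) (d : Nat) :
    subcheck s (d : Int) = true ↔
      (PySem.Int.mod (s.length : Int) (d : Int) = 0 ∧
        blkList s d = (blkList s d).reverse) := by
  unfold subcheck
  simp only [PySem.Int.mod_natCast, PySem.Int.floordiv_natCast]
  by_cases hm : s.length % d = 0
  · rw [hm]
    simp only [Nat.cast_zero, ne_eq, not_true_eq_false, if_false, true_and]
    have hdvd : d ∣ s.length := Nat.dvd_of_mod_eq_zero hm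
    set c := s.length / d with hc
    have hn : s.length = c * d := by rw [hc, Nat.div_mul_cancel hdvd]
    rw [subcheckLoop_iff, blkList, map_range_eq_reverse_iff,
        PySem.List.pyRange_zero_natCast]
    simp only [List.mem_map, List.mem_range]
    constructor
    · intro h i hi
      have := h (i : Int) ⟨i, hi, rfl⟩
      rwa [sliceA_eq_blk, sliceA2_eq_blk s c d i hn hi] at this
    · rintro h x ⟨i, hi, rfl⟩
      rw [sliceA_eq_blk, sliceA2_eq_blk s c d i hn hi]
      exact h i hi
  · rw [if_pos (by exact_mod_cast hm)]
    simp only [Bool.false_eq_true, false_iff, not_and]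
    intro hmod
    exact (hm (by exact_mod_cast hmod)).elim

-- width = length always passes the subcheck (the whole string is the single chunk)
theorem subcheck_len (s : List Char) (h : s ≠ []) : subcheck s (s.length : Int) = true := by
  have hd : 1 ≤ s.length := List.length_pos_of_ne_nil h
  rw [subcheck_iff s s.length]
  constructor
  · rw [PySem.Int.mod_natCast, Nat.mod_self]; rfl
  · rw [blkList, Nat.div_self (by omega)]
    rfl

-- a passing subcheck forces last block = first block, so the character guard in A's loop holds
theorem guard_of_subcheck (s : List Char) (d : Nat) (hd : 1 ≤ d) (hdn : d ≤ s.length)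
    (h : subcheck s (d : Int) = true) (m : Char) (hm : s[0]? = some m) :
    s.reverse[d - 1]? = some m := by
  obtain ⟨hmod, hpal⟩ := (subcheck_iff s d).1 h
  rw [PySem.Int.mod_natCast] at hmod
  have hm0 : s.length % d = 0 := by exact_mod_cast hmod
  have hdvd : d ∣ s.length := Nat.dvd_of_mod_eq_zero hm0
  set c := s.length / d with hc
  have hn : s.length = c * d := by rw [hc, Nat.div_mul_cancel hdvd]
  have hc1 : 1 ≤ c := (Nat.one_le_div_iff (by omega)).2 hdn
  rw [blkList, map_range_eq_reverse_iff] at hpal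
  have hblk := hpal 0 (by omega)
  simp only [Nat.sub_zero] at hblk
  have h1 : (blk s d 0)[0]? = some m := by
    simp only [blk, Nat.zero_mul, List.drop_zero, List.getElem?_take]
    simp [hm]
    omega
  rw [hblk] at h1
  have h2 : (blk s d (c - 1))[0]? = s[(c - 1) * d]? := by
    simp only [blk, List.getElem?_take, List.getElem?_drop]
    simp
    omega
  rw [h2] at h1
  rw [List.getElem?_reverse (by omega)]
  have heq : s.length - 1 - (d - 1) = (c - 1) * d := by
    have : c * d - d = (c - 1) * d := by rw [Nat.sub_one_mul]
    omega
  rw [heq]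
  exact h1

-- A's walk from position k of the reversed string equals the range scan from k+1
theorem main_loop (s : List Char) (m : Char) (hm : s[0]? = some m) (k : Nat) (hk : k ≤ s.length) :
    solLoop s m (s.length : Int) (s.reverse.drop k) (k : Int)
      = rangeLoop s (s.length : Int) (PySem.List.pyRange ((k : Int) + 1) (s.length : Int) 1) := by
  induction ht : s.length - k generalizing k with
  | zero =>
      have hk' : k = s.length := by omega
      rw [hk', List.drop_eq_nil_of_le (by simp)]
      rw [PySem.List.pyRange_one_eq_nil (by omega)]
      rfl
  | succ t ih =>
      have hkn : k < s.length := by omega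
      rw [List.drop_eq_getElem_cons (by simpa using hkn)]
      have hcast : ((k : Int) + 1) = ((k + 1 : Nat) : Int) := by push_cast; ring
      by_cases hsub : subcheck s ((k + 1 : Nat) : Int) = true
      · -- subcheck passes at width k+1: the guard holds automatically
        have hguard : s.reverse[k]? = some m := by
          have := guard_of_subcheck s (k + 1) (by omega) (by omega) hsub m hm
          simpa using this
        have hj : s.reverse[k]'(by simpa using hkn) = m := by
          have h3 : s.reverse[k]? = some (s.reverse[k]'(by simpa using hkn)) := List.getElem?_eq_getElem _
          rw [hguard] at h3
          exact (Option.some_inj.1 h3).symm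
        obtain ⟨hmod, hpal⟩ := (subcheck_iff s (k + 1)).1 hsub
        simp only [solLoop, hj, hcast, hsub, if_pos]
        by_cases hlast : k + 1 = s.length
        · rw [if_pos (by exact_mod_cast congrArg (Nat.cast : Nat → Int) hlast)]
          rw [PySem.List.pyRange_one_eq_nil (by omega)]
          rfl
        · rw [if_neg (show ¬((k + 1 : Nat) : Int) = (s.length : Int) by exact_mod_cast hlast)]
          rw [PySem.List.pyRange_one_cons (show ((k + 1 : Nat) : Int) < (s.length : Int) by exact_mod_cast (show k + 1 < s.length by omega))]
          simp only [rangeLoop]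
          rw [if_pos hmod, if_pos (by simpa using hpal)]
      · -- subcheck fails at width k+1 (hence k+1 < length): both loops skip to k+2
        have hlast : k + 1 ≠ s.length := by
          intro hcon
          apply hsub
          rw [hcon]
          exact subcheck_len s (by intro hnil; simp [hnil] at hkn)
        have hrec := ih (k + 1) (by omega) (by omega)
        simp only [solLoop, hcast, hsub, Bool.false_eq_true, if_false, ite_self]
        rw [PySem.List.pyRange_one_cons (show ((k + 1 : Nat) : Int) < (s.length : Int) by exact_mod_cast (show k + 1 < s.length by omega))]
        have hskip : rangeLoop s (s.length : Int) (((k + 1 : Nat) : Int) :: PySem.List.pyRange (((k + 1 : Nat) : Int) + 1) (s.length : Int) 1)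
            = rangeLoop s (s.length : Int) (PySem.List.pyRange (((k + 1 : Nat) : Int) + 1) (s.length : Int) 1) := by
          simp only [rangeLoop]
          rw [subcheck_iff s (k + 1)] at hsub
          rw [not_and] at hsub
          by_cases hmod : PySem.Int.mod (s.length : Int) ((k + 1 : Nat) : Int) = 0
          · rw [if_pos hmod, if_neg (by simpa using hsub hmod)]
          · rw [if_neg hmod]
        rw [hskip]
        exact hrec

-- ---- B-side: the divisor generator ----

-- the cofactor accumulator is always the mapped filter of the small accumulator
theorem altDivs_snd (n : Int) : ∀ (i : Int) (small large : List Int),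
    large = (small.filter (fun x => decide (x ≠ PySem.Int.floordiv n x))).map
              (fun x => PySem.Int.floordiv n x) →
    (altDivs n i small large).2
      = ((altDivs n i small large).1.filter (fun x => decide (x ≠ PySem.Int.floordiv n x))).map
          (fun x => PySem.Int.floordiv n x) := by
  suffices H : ∀ (t : Nat) (i : Int) (small large : List Int), (n + 1 - i).toNat ≤ t →
      large = (small.filter (fun x => decide (x ≠ PySem.Int.floordiv n x))).map
                (fun x => PySem.Int.floordiv n x) →
      (altDivs n i small large).2
        = ((altDivs n i small large).1.filter (fun x => decide (x ≠ PySem.Int.floordiv n x))).map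
            (fun x => PySem.Int.floordiv n x) by
    intro i small large h
    exact H (n + 1 - i).toNat i small large le_rfl h
  intro t
  induction t with
  | zero =>
      intro i small large ht h
      have hng : ¬ i * i ≤ n := by
        intro hg
        have hin : i ≤ n := by nlinarith [sq_nonneg (i - 1), mul_self_nonneg i]
        omega
      rw [altDivs_unfold, if_neg hng]
      exact h
  | succ t ih =>
      intro i small large ht h
      rw [altDivs_unfold]
      by_cases hg : i * i ≤ n
      · have hin : i ≤ n := by nlinarith [sq_nonneg (i - 1), mul_self_nonneg i]
        rw [if_pos hg]
        by_cases hmz : PySem.Int.mod n i = 0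
        · rw [if_pos hmz]
          apply ih _ _ _ (by omega)
          rw [List.filter_append, List.map_append, ← h]
          simp only [List.filter_cons, List.filter_nil]
          by_cases hne : i ≠ PySem.Int.floordiv n i
          · rw [if_pos hne, if_pos (by simpa using hne)]
            rfl
          · rw [if_neg hne, if_neg (by simpa using hne)]
            simp
        · rw [if_neg hmz]
          exact ih _ _ _ (by omega) h
      · rw [if_neg hg]
        exact h

-- membership in the small accumulator's output
theorem altDivs_fst_mem (n : Int) : ∀ (i : Int), 1 ≤ i → ∀ (small large : List Int) (x : Int),
    x ∈ (altDivs n i small large).1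
      ↔ x ∈ small ∨ (i ≤ x ∧ x * x ≤ n ∧ PySem.Int.mod n x = 0) := by
  suffices H : ∀ (t : Nat) (i : Int), 1 ≤ i → ∀ (small large : List Int) (x : Int),
      (n + 1 - i).toNat ≤ t →
      (x ∈ (altDivs n i small large).1
        ↔ x ∈ small ∨ (i ≤ x ∧ x * x ≤ n ∧ PySem.Int.mod n x = 0)) by
    intro i hi small large x
    exact H (n + 1 - i).toNat i hi small large x le_rfl
  intro t
  induction t with
  | zero =>
      intro i hi small large x ht
      have hng : ¬ i * i ≤ n := by
        intro hg
        have hin : i ≤ n := by nlinarith [sq_nonneg (i - 1), mul_self_nonneg i]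
        omega
      rw [altDivs_unfold, if_neg hng]
      constructor
      · exact fun hx => Or.inl hx
      · rintro (hx | ⟨hix, hxx, _⟩)
        · exact hx
        · exact absurd (by nlinarith : i * i ≤ n) hng
  | succ t ih =>
      intro i hi small large x ht
      rw [altDivs_unfold]
      by_cases hg : i * i ≤ n
      · have hin : i ≤ n := by nlinarith [sq_nonneg (i - 1), mul_self_nonneg i]
        rw [if_pos hg]
        by_cases hmz : PySem.Int.mod n i = 0
        · rw [if_pos hmz]
          rw [ih (i + 1) (by omega) _ _ x (by omega)]
          simp only [List.mem_append, List.mem_singleton]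
          constructor
          · rintro ((hx | rfl) | ⟨hix, hxx, hmx⟩)
            · exact Or.inl hx
            · exact Or.inr ⟨le_refl _, hg, hmz⟩
            · exact Or.inr ⟨by omega, hxx, hmx⟩
          · rintro (hx | ⟨hix, hxx, hmx⟩)
            · exact Or.inl (Or.inl hx)
            · by_cases hxi : x = i
              · exact Or.inl (Or.inr hxi)
              · exact Or.inr ⟨by omega, hxx, hmx⟩
        · rw [if_neg hmz]
          rw [ih (i + 1) (by omega) _ _ x (by omega)]
          constructor
          · rintro (hx | ⟨hix, hxx, hmx⟩)
            · exact Or.inl hx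
            · exact Or.inr ⟨by omega, hxx, hmx⟩
          · rintro (hx | ⟨hix, hxx, hmx⟩)
            · exact Or.inl hx
            · have hxi : x ≠ i := fun hcon => hmz (hcon ▸ hmx)
              exact Or.inr ⟨by omega, hxx, hmx⟩
      · rw [if_neg hg]
        constructor
        · exact fun hx => Or.inl hx
        · rintro (hx | ⟨hix, hxx, _⟩)
          · exact hx
          · exact absurd (by nlinarith : i * i ≤ n) hg

-- the small accumulator's output is strictly ascending
theorem altDivs_fst_pairwise (n : Int) : ∀ (i : Int), 1 ≤ i → ∀ (small large : List Int),
    small.Pairwise (· < ·) → (∀ x ∈ small, x < i) →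
    (altDivs n i small large).1.Pairwise (· < ·) := by
  suffices H : ∀ (t : Nat) (i : Int), 1 ≤ i → ∀ (small large : List Int), (n + 1 - i).toNat ≤ t →
      small.Pairwise (· < ·) → (∀ x ∈ small, x < i) →
      (altDivs n i small large).1.Pairwise (· < ·) by
    intro i hi small large hp hb
    exact H (n + 1 - i).toNat i hi small large le_rfl hp hb
  intro t
  induction t with
  | zero =>
      intro i hi small large ht hp hb
      have hng : ¬ i * i ≤ n := by
        intro hg
        have hin : i ≤ n := by nlinarith [sq_nonneg (i - 1), mul_self_nonneg i]
        omega
      rw [altDivs_unfold, if_neg hng]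
      exact hp
  | succ t ih =>
      intro i hi small large ht hp hb
      rw [altDivs_unfold]
      by_cases hg : i * i ≤ n
      · have hin : i ≤ n := by nlinarith [sq_nonneg (i - 1), mul_self_nonneg i]
        rw [if_pos hg]
        by_cases hmz : PySem.Int.mod n i = 0
        · rw [if_pos hmz]
          apply ih (i + 1) (by omega) _ _ (by omega)
          · rw [List.pairwise_append]
            refine ⟨hp, List.pairwise_singleton _ _, ?_⟩
            intro a ha b hb'
            rw [List.mem_singleton] at hb'
            subst hb'
            exact hb a ha
          · intro x hx
            rcases List.mem_append.1 hx with hx | hx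
            · have := hb x hx; omega
            · rw [List.mem_singleton] at hx; omega
        · rw [if_neg hmz]
          apply ih (i + 1) (by omega) _ _ (by omega) hp
          intro x hx
          have := hb x hx
          omega
      · rw [if_neg hg]
        exact hp

-- the full divisor list equals the ascending filter of range(1, n+1)
theorem divisors_eq (n : Int) (hn : 1 ≤ n) :
    (altDivs n 1 [] []).1 ++ ((altDivs n 1 [] []).2).reverse
      = (PySem.List.pyRange 1 (n + 1) 1).filter (fun d => decide (PySem.Int.mod n d = 0)) := by
  set Sm := (altDivs n 1 [] []).1 with hSm
  set La := (altDivs n 1 [] []).2 with hLa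
  have hmem : ∀ x, x ∈ Sm ↔ 1 ≤ x ∧ x * x ≤ n ∧ PySem.Int.mod n x = 0 := by
    intro x
    rw [hSm, altDivs_fst_mem n 1 le_rfl [] [] x]
    simp
  have hps : Sm.Pairwise (· < ·) :=
    altDivs_fst_pairwise n 1 le_rfl [] [] List.Pairwise.nil (by simp)
  have hla : La = (Sm.filter (fun x => decide (x ≠ PySem.Int.floordiv n x))).map
      (fun x => PySem.Int.floordiv n x) :=
    altDivs_snd n 1 [] [] (by simp)
  have hgd : ∀ x : Int, 1 ≤ x → x ∣ n → PySem.Int.floordiv n x * x = n := by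
    intro x hx hdvd
    rw [PySem.Int.floordiv_eq_ediv_of_pos (by omega)]
    exact Int.ediv_mul_cancel hdvd
  have hfdx : ∀ x y : Int, 1 ≤ x → n = y * x → PySem.Int.floordiv n x = y := by
    intro x y hx hxy
    have hdvd : x ∣ n := ⟨y, by linarith [mul_comm x y]⟩
    have h1 : PySem.Int.floordiv n x * x = n := hgd x hx hdvd
    exact mul_right_cancel₀ (by omega : x ≠ (0 : Int)) (by linarith)
  have hmemLa : ∀ y, y ∈ La ↔ 1 ≤ y ∧ n < y * y ∧ y ∣ n := by
    intro y
    rw [hla]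
    simp only [List.mem_map, List.mem_filter]
    constructor
    · rintro ⟨x, ⟨hxs, hpx⟩, rfl⟩
      rw [hmem] at hxs
      obtain ⟨hx1, hxx, hxm⟩ := hxs
      have hdvd : x ∣ n := (PySem.Int.mod_eq_zero_iff_dvd n x).1 hxm
      have hgx : PySem.Int.floordiv n x * x = n := hgd x hx1 hdvd
      have hne : x ≠ PySem.Int.floordiv n x := by simpa using hpx
      set y := PySem.Int.floordiv n x with hy
      have hy1 : 1 ≤ y := by nlinarith [hgx]
      have hxy : x < y := by
        have hxle : x ≤ y := by nlinarith [hgx]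
        omega
      exact ⟨hy1, by nlinarith [hgx], ⟨x, by linarith [hgx]⟩⟩
    · rintro ⟨hy1, hyy, x, hxeq⟩
      have hx1 : 1 ≤ x := by nlinarith
      have hxy : x < y := by nlinarith
      have hfd : PySem.Int.floordiv n x = y := hfdx x y hx1 (by linarith [mul_comm y x])
      refine ⟨x, ⟨?_, ?_⟩, hfd⟩
      · rw [hmem]
        refine ⟨hx1, by nlinarith, ?_⟩
        exact (PySem.Int.mod_eq_zero_iff_dvd n x).2 ⟨y, by linarith [mul_comm y x]⟩
      · simp only [decide_eq_true_eq, hfd]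
        omega
  have hpl : La.Pairwise (· > ·) := by
    rw [hla, List.pairwise_map]
    have hf := List.Pairwise.and_mem.mp (hps.filter (fun x => decide (x ≠ PySem.Int.floordiv n x)))
    refine hf.imp ?_
    rintro a b ⟨ha, hb, hab⟩
    rw [List.mem_filter, hmem] at ha hb
    obtain ⟨⟨ha1, haa, ham⟩, -⟩ := ha
    obtain ⟨⟨hb1, hbb, hbm⟩, -⟩ := hb
    have hga : PySem.Int.floordiv n a * a = n :=
      hgd a ha1 ((PySem.Int.mod_eq_zero_iff_dvd n a).1 ham)
    have hgb : PySem.Int.floordiv n b * b = n :=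
      hgd b hb1 ((PySem.Int.mod_eq_zero_iff_dvd n b).1 hbm)
    have hga1 : 1 ≤ PySem.Int.floordiv n a := by nlinarith [hga]
    have hgb1 : 1 ≤ PySem.Int.floordiv n b := by nlinarith [hgb]
    nlinarith [hga, hgb]
  have hplr : La.reverse.Pairwise (· < ·) := by
    rw [List.pairwise_reverse]
    exact hpl
  have hcross : ∀ a ∈ Sm, ∀ b ∈ La.reverse, a < b := by
    intro a ha b hb
    rw [List.mem_reverse] at hb
    rw [hmem] at ha
    rw [hmemLa] at hb
    obtain ⟨ha1, haa, -⟩ := ha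
    obtain ⟨hb1, hbb, -⟩ := hb
    nlinarith
  have hpLHS : (Sm ++ La.reverse).Pairwise (· < ·) :=
    List.pairwise_append.mpr ⟨hps, hplr, hcross⟩
  have hpRHS : ((PySem.List.pyRange 1 (n + 1) 1).filter
      (fun d => decide (PySem.Int.mod n d = 0))).Pairwise (· < ·) :=
    (PySem.List.pairwise_lt_pyRange_one 1 (n + 1)).filter _
  have hmemiff : ∀ x, x ∈ Sm ++ La.reverse ↔
      x ∈ (PySem.List.pyRange 1 (n + 1) 1).filter (fun d => decide (PySem.Int.mod n d = 0)) := by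
    intro x
    rw [List.mem_append, List.mem_reverse, hmem, hmemLa, List.mem_filter,
        PySem.List.mem_pyRange_one, decide_eq_true_eq]
    constructor
    · rintro (⟨h1, hxx, hm⟩ | ⟨h1, hxx, hdvd⟩)
      · have hdvd : x ∣ n := (PySem.Int.mod_eq_zero_iff_dvd n x).1 hm
        have := Int.le_of_dvd (by omega) hdvd
        exact ⟨⟨h1, by omega⟩, hm⟩
      · have := Int.le_of_dvd (by omega) hdvd
        exact ⟨⟨h1, by omega⟩, (PySem.Int.mod_eq_zero_iff_dvd n x).2 hdvd⟩
    · rintro ⟨⟨h1, h2⟩, hm⟩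
      by_cases hxx : x * x ≤ n
      · exact Or.inl ⟨h1, hxx, hm⟩
      · exact Or.inr ⟨h1, by omega, (PySem.Int.mod_eq_zero_iff_dvd n x).1 hm⟩
  have hperm := (List.perm_ext_iff_of_nodup
      (hpLHS.imp (fun h => ne_of_lt h)) (hpRHS.imp (fun h => ne_of_lt h))).2 hmemiff
  exact hperm.eq_of_pairwise (fun a b _ _ h h' => absurd h' (not_lt_of_gt h)) hpLHS hpRHS

-- ---- B-side: the per-width test ----

-- the blocks of width d tile s when d divides its length
theorem blkList_flatten (s : List Char) (d : Nat) (hdvd : d ∣ s.length) :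
    (blkList s d).flatten = s := by
  suffices H : ∀ (c : Nat) (s : List Char), s.length = c * d →
      ((List.range c).map (blk s d)).flatten = s by
    have hc : s.length = (s.length / d) * d := (Nat.div_mul_cancel hdvd).symm
    exact H (s.length / d) s hc
  intro c
  induction c with
  | zero =>
      intro s hs
      simp at hs
      simp [hs]
  | succ c ih =>
      intro s hs
      rw [List.range_succ_eq_map, List.map_cons, List.flatten_cons, List.map_map]
      have hblk : ∀ i : Nat, blk s d (Nat.succ i) = blk (s.drop d) d i := by
        intro i
        simp only [blk, List.drop_drop]
        congr 2
        rw [Nat.succ_mul]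
        omega
      have hmap : (List.range c).map (blk s d ∘ Nat.succ) = (List.range c).map (blk (s.drop d) d) := by
        apply List.map_congr_left
        intro i _
        exact hblk i
      rw [hmap, ih (s.drop d) (by rw [List.length_drop, hs, Nat.succ_mul]; omega)]
      simp [blk]
  

theorem blk_length (s : List Char) (d i : Nat) (hi : (i + 1) * d ≤ s.length) :
    (blk s d i).length = d := by
  rw [Nat.succ_mul] at hi
  simp [blk]
  omega

-- flatten is injective on lists of pieces of one positive width
theorem flatten_inj (d : Nat) (hd : 1 ≤ d) : ∀ (l1 l2 : List (List Char)),
    (∀ x ∈ l1, x.length = d) → (∀ x ∈ l2, x.length = d) →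
    l1.flatten = l2.flatten → l1 = l2 := by
  intro l1
  induction l1 with
  | nil =>
      intro l2 _ h2 hf
      cases l2 with
      | nil => rfl
      | cons b t2 =>
          exfalso
          have hb : b.length = d := h2 b (List.mem_cons_self)
          have : ([] : List Char) = b ++ t2.flatten := by simpa using hf
          have := congrArg List.length this
          simp [hb] at this
          omega
  | cons a t1 ih =>
      intro l2 h1 h2 hf
      cases l2 with
      | nil =>
          exfalso
          have ha : a.length = d := h1 a (List.mem_cons_self)
          have : a ++ t1.flatten = ([] : List Char) := by simpa using hf
          have := congrArg List.length this
          simp [ha] at this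
          omega
      | cons b t2 =>
          simp only [List.flatten_cons] at hf
          have hlen : a.length = b.length := by
            rw [h1 a (List.mem_cons_self), h2 b (List.mem_cons_self)]
          obtain ⟨hab, htf⟩ := List.append_inj hf hlen
          rw [hab, ih t2 (fun x hx => h1 x (List.mem_cons_of_mem _ hx))
                (fun x hx => h2 x (List.mem_cons_of_mem _ hx)) htf]

-- B's join-of-reversed-blocks is the flatten of the reversed block list
theorem joinRevBlocks_eq (s : List Char) (d : Nat) :
    joinRevBlocks s (s.length : Int) (d : Int)
      = ((blkList s d).map List.reverse).flatten := by
  unfold joinRevBlocks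
  rw [PySem.Int.floordiv_natCast, PySem.List.pyRange_zero_natCast, List.map_map]
  rw [blkList, List.map_map]
  congr 1
  apply List.map_congr_left
  intro i _
  simp only [Function.comp_apply]
  rw [sliceB_eq_blk s d i, PySem.List.slice?_none_none_neg_one]
  rfl

-- the reversal characterisation: R == join of reversed blocks ⟺ block list is a palindrome
theorem test_iff (s : List Char) (d : Nat) (hd : 1 ≤ d) (hdvd : d ∣ s.length) :
    (s.reverse = joinRevBlocks s (s.length : Int) (d : Int))
      ↔ (blkList s d = (blkList s d).reverse) := by
  have hc : s.length = (s.length / d) * d := (Nat.div_mul_cancel hdvd).symm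
  have hflat : (blkList s d).flatten = s := blkList_flatten s d hdvd
  have hlen : ∀ x ∈ blkList s d, x.length = d := by
    intro x hx
    rw [blkList] at hx
    obtain ⟨i, hi, rfl⟩ := List.mem_map.1 hx
    rw [List.mem_range] at hi
    refine blk_length s d i ?_
    have h2 : (i + 1) * d ≤ (s.length / d) * d := Nat.mul_le_mul_right d hi
    omega
  rw [joinRevBlocks_eq]
  have hrev : s.reverse = ((blkList s d).map List.reverse).reverse.flatten := by
    rw [← hflat, List.reverse_flatten, hflat]
  constructor
  · intro h
    rw [hrev] at h
    have hinj := flatten_inj d hd (((blkList s d).map List.reverse).reverse)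
        ((blkList s d).map List.reverse)
        (by intro x hx
            rw [List.mem_reverse] at hx
            obtain ⟨y, hy, rfl⟩ := List.mem_map.1 hx
            simpa using hlen y hy)
        (by intro x hx
            obtain ⟨y, hy, rfl⟩ := List.mem_map.1 hx
            simpa using hlen y hy)
        h
    rw [← List.map_reverse] at hinj
    exact (List.map_injective_iff.2 List.reverse_injective hinj).symm
  · intro h
    rw [hrev, ← List.map_reverse, ← h]

-- B's loop over a list of positive divisors equals the reference firstPal loop
theorem altLoop_eq_firstPal (s : List Char) (L : List Int)
    (h : ∀ d ∈ L, 1 ≤ d ∧ d.toNat ∣ s.length ∧ d = (d.toNat : Int)) :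
    altLoop s s.reverse (s.length : Int) L
      = firstPal s (L.filter (fun d => decide (d < (s.length : Int)))) := by
  induction L with
  | nil => rfl
  | cons d rest ih =>
      obtain ⟨hd1, hdvd, hcast⟩ := h d List.mem_cons_self
      have hrest := ih (fun x hx => h x (List.mem_cons_of_mem _ hx))
      have htest := test_iff s d.toNat (by omega) hdvd
      rw [← hcast] at htest
      by_cases hdn : d < (s.length : Int)
      · rw [List.filter_cons, if_pos (by simpa using hdn)]
        by_cases hpal : blkList s d.toNat = (blkList s d.toNat).reverse
        · show (if d < (s.length : Int) ∧ s.reverse = joinRevBlocks s (s.length : Int) d then d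
              else altLoop s s.reverse (s.length : Int) rest) = _
          rw [if_pos ⟨hdn, htest.2 hpal⟩]
          show _ = (if blkList s d.toNat = (blkList s d.toNat).reverse then d else _)
          rw [if_pos hpal]
        · show (if d < (s.length : Int) ∧ s.reverse = joinRevBlocks s (s.length : Int) d then d
              else altLoop s s.reverse (s.length : Int) rest) = _
          rw [if_neg (by rintro ⟨-, ht⟩; exact hpal (htest.1 ht))]
          show _ = (if blkList s d.toNat = (blkList s d.toNat).reverse then d else _)
          rw [if_neg hpal]
          exact hrest
      · rw [List.filter_cons, if_neg (by simpa using hdn)]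
        show (if d < (s.length : Int) ∧ s.reverse = joinRevBlocks s (s.length : Int) d then d
            else altLoop s s.reverse (s.length : Int) rest) = _
        rw [if_neg (by rintro ⟨hc, -⟩; exact hdn hc)]
        exact hrest

-- ===== VERDICT (by name: the statement is the Claim_ definition above) =====
theorem solution_spec : Claim_equal_solution := by
  intro S _ hpre
  unfold Spec_solution solution solution_alt
  have h0 : PySem.Str.pyGet? S 0 = S.toList[0]? := by
    simpa using PySem.Str.pyGet?_natCast S 0
  obtain ⟨m, hm⟩ : ∃ m, S.toList[0]? = some m := by
    cases h : S.toList with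
    | nil => exact absurd h hpre
    | cons a l => exact ⟨a, rfl⟩
  rw [h0, hm]
  simp only [PySem.List.slice?_none_none_neg_one, Option.getD_some]
  have hn1 : 1 ≤ S.toList.length := List.length_pos_of_ne_nil hpre
  have hnn : (1 : Int) ≤ (S.toList.length : Int) := by exact_mod_cast hn1
  have hA := main_loop S.toList m hm 0 (by omega)
  simp only [List.drop_zero, Nat.cast_zero, zero_add] at hA
  have hdiv := divisors_eq (S.toList.length : Int) hnn
  have hmemD : ∀ d ∈ (altDivs (S.toList.length : Int) 1 [] []).1
      ++ ((altDivs (S.toList.length : Int) 1 [] []).2).reverse,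
      1 ≤ d ∧ d.toNat ∣ S.toList.length ∧ d = (d.toNat : Int) := by
    intro d hd
    rw [hdiv, List.mem_filter, PySem.List.mem_pyRange_one, decide_eq_true_eq] at hd
    obtain ⟨⟨h1, h2⟩, hmz⟩ := hd
    have hdvd : d ∣ (S.toList.length : Int) :=
      (PySem.Int.mod_eq_zero_iff_dvd (S.toList.length : Int) d).1 hmz
    refine ⟨h1, ?_, by omega⟩
    have hcast : ((d.toNat : Nat) : Int) = d := by omega
    rw [← hcast] at hdvd
    exact_mod_cast hdvd
  have hB := altLoop_eq_firstPal S.toList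
      ((altDivs (S.toList.length : Int) 1 [] []).1
        ++ ((altDivs (S.toList.length : Int) 1 [] []).2).reverse) hmemD
  rw [hB, hA, rangeLoop_eq_firstPal]
  congr 1
  rw [hdiv]
  rw [show ((S.toList.length : Int) + 1) = ((S.toList.length : Int)) + 1 from rfl,
      PySem.List.pyRange_one_succ_right hnn, List.filter_append, List.filter_append]
  have hqn : (List.filter (fun d => decide (PySem.Int.mod (S.toList.length : Int) d = 0))
      [(S.toList.length : Int)]) = [(S.toList.length : Int)] := by
    simp [PySem.Int.mod_eq_zero_iff_dvd]
  rw [hqn]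
  have hself : (List.filter (fun d => decide (d < (S.toList.length : Int)))
      ((PySem.List.pyRange 1 (S.toList.length : Int) 1).filter
        (fun d => decide (PySem.Int.mod (S.toList.length : Int) d = 0))))
      = (PySem.List.pyRange 1 (S.toList.length : Int) 1).filter
        (fun d => decide (PySem.Int.mod (S.toList.length : Int) d = 0)) := by
    rw [List.filter_eq_self]
    intro a ha
    rw [List.mem_filter, PySem.List.mem_pyRange_one] at ha
    simpa using ha.1.2
  have hdrop : (List.filter (fun d => decide (d < (S.toList.length : Int)))
      [(S.toList.length : Int)]) = [] := by
    simp
  rw [hself, hdrop, List.append_nil]
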